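-- pv_equiv track=rewrite | github.com/jaewoooong/coding-test | 백준/Gold/14719. 빗물/빗물.py | findPoolSize
-- ===== SOURCE A (Python) =====
-- def findPoolSize(matrix:list)->int:
--     size = 0
--     row, col = len(matrix[0]), len(matrix)
--     for y in range(col-1, -1, -1):
--         for x in range(row):
--             if matrix[y][x] == 0 and isPool(matrix[y], x):
--                 size += 1
--     return size
--
-- def isPool(row:list, start:int)->bool:
--     if 1 in row[:start] and 1 in row[start + 1:]:
--         return True
--     return False
-- ===== SOURCE B (Python) =====
-- def findPoolSize(matrix: list) -> int:
--     # Water collects at the zeros strictly between the first and last 1 of each row.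
--     total = 0
--     for r in matrix:
--         if 1 in r:
--             left = r.index(1)
--             right = len(r) - 1 - r[::-1].index(1)
--             total += r[left + 1:right].count(0)
--     return total
-- ===== Notes on version B (the rewrite author's own statement) =====
-- stated objective: alternative
-- what changed: Instead of re-scanning the whole row (via two slices) for every cell, B finds the first and last 1 of each row once and counts the zeros strictly between them in a single pass; Pre_ restricts to nonempty rectangular matrices, the natural domain of a height grid (A raises IndexError when a row is shorter than the first, and on ragged longer rows A's scan of only the first row's width is an artefact of the malformed input).
-- outside the precondition, e.g. on findPoolSize([[1, 0], [1, 0, 0, 1]]): A returns 1, B returns 2; on findPoolSize([[0, 1], [1]]): A raises IndexError, B returns 0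
import Mathlib
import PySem

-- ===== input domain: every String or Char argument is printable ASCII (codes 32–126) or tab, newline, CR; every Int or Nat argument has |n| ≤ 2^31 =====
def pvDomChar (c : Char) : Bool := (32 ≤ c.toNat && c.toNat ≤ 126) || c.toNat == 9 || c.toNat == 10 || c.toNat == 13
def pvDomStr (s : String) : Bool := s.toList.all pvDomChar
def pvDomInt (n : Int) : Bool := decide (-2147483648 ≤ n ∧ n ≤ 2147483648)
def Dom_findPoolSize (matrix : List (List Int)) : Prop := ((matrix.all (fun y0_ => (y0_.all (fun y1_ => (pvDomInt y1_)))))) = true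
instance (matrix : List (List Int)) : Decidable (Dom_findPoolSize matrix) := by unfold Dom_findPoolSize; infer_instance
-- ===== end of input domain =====

-- B replaces A's per-cell slice re-scans with one first-1/last-1 computation and a single zero-count per row (alternative, asymptotically lighter algorithm; not confirmed faster in a timing run).

-- ===== PORT A =====
def isPool (r : List Int) (start : Int) : Bool :=
  if (PySem.List.slice r none (some start)).contains 1 && (PySem.List.slice r (some (start + 1)) none).contains 1
  then true else false

def findPoolSize (matrix : List (List Int)) : Int :=
  let row : Int := ((PySem.List.pyGetD matrix 0 ([] : List Int)).length : Int)
  let col : Int := (matrix.length : Int)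
  (PySem.List.pyRange (col - 1) (-1) (-1)).foldl (fun size y =>
    (PySem.List.pyRange 0 row 1).foldl (fun size x =>
      if PySem.List.pyGetD (PySem.List.pyGetD matrix y ([] : List Int)) x 0 == 0
          && isPool (PySem.List.pyGetD matrix y ([] : List Int)) x
      then size + 1 else size) size) 0

-- ===== PORT B =====
def findPoolSize_alt (matrix : List (List Int)) : Int :=
  matrix.foldl (fun total r =>
    if r.contains 1 then
      let left : Int := (((PySem.List.index? r 1).getD 0 : Nat) : Int)
      let right : Int := (r.length : Int) - 1 - (((PySem.List.index? r.reverse 1).getD 0 : Nat) : Int)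
      total + (PySem.List.count (PySem.List.slice r (some (left + 1)) (some right)) 0 : Nat)
    else total) 0

-- ===== PRECONDITION & SPEC =====
-- Pre_ restricts to nonempty rectangular matrices, the natural domain of a height grid:
-- A raises IndexError on the empty matrix (matrix[0]) and whenever a row is shorter than
-- the first (matrix[y][x] for x in range(len(matrix[0]))); on ragged matrices with longer
-- rows A returns a value, but its scan of only the first row's width is an artefact of
-- the malformed input, so those inputs are excluded too.
def Pre_findPoolSize (matrix : List (List Int)) : Prop :=
  matrix ≠ [] ∧ (matrix.all (fun r => r.length == (PySem.List.pyGetD matrix 0 ([] : List Int)).length)) = true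
instance (matrix : List (List Int)) : Decidable (Pre_findPoolSize matrix) := by
  unfold Pre_findPoolSize; infer_instance
def pvWitness_findPoolSize : List (List Int) := [[1, 0, 1], [1, 1, 0]]

def Spec_findPoolSize (matrix : List (List Int)) (out : Int) : Prop := out = findPoolSize_alt matrix
instance (matrix : List (List Int)) (out : Int) : Decidable (Spec_findPoolSize matrix out) := by
  unfold Spec_findPoolSize; infer_instance

-- ===== CLAIM (what is proved, stated in full; the proofs are below) =====
def Claim_equal_findPoolSize : Prop := ∀ (matrix : List (List Int)), Dom_findPoolSize matrix → Pre_findPoolSize matrix → Spec_findPoolSize matrix (findPoolSize matrix)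

-- ===== LEMMAS AND PROOFS =====

-- first occurrence of 1 characterises membership in a prefix
lemma take_contains_one (r : List Int) (l : Nat)
    (h : PySem.List.index? r 1 = some l) (n : Nat) :
    (r.take n).contains 1 = decide (l < n) := by
  obtain ⟨hl, hval, hmin⟩ := PySem.List.getElem_of_index?_eq_some h
  by_cases hn : l < n
  · have hmem : (1 : Int) ∈ r.take n := by
      have hlt : l < (r.take n).length := by simp [List.length_take]; omega
      have : (r.take n)[l] = r[l] := List.getElem_take ..
      rw [← hval, ← this]
      exact List.getElem_mem hlt
    simp [hmem, hn]
  · have hnot : (1 : Int) ∉ r.take n := by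
      intro hmem
      obtain ⟨i, hi, hget⟩ := List.mem_iff_getElem.mp hmem
      have hi' : i < n := by have := hi; simp [List.length_take] at this; omega
      have : (r.take n)[i] = r[i]'(by have := hi; simp [List.length_take] at this; omega) :=
        List.getElem_take ..
      exact hmin i (by omega) (by rw [← this, hget])
    simp [hnot, hn]

-- last occurrence of 1 (first of the reverse) characterises membership in a suffix
lemma drop_contains_one (r : List Int) (l' : Nat)
    (h : PySem.List.index? r.reverse 1 = some l') (n : Nat) :
    (r.drop n).contains 1 = decide (n + l' + 1 ≤ r.length) := by
  obtain ⟨hl, hval, hmin⟩ := PySem.List.getElem_of_index?_eq_some h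
  have hlen : l' < r.length := by simpa using hl
  by_cases hn : n + l' + 1 ≤ r.length
  · have hN : r[r.length - 1 - l']'(by omega) = 1 := by
      rw [← hval]; rw [List.getElem_reverse]
    have hmem : (1 : Int) ∈ r.drop n := by
      have hidx : r.length - 1 - l' - n < (r.drop n).length := by
        simp [List.length_drop]; omega
      have hdi : (r.drop n)[r.length - 1 - l' - n] = r[n + (r.length - 1 - l' - n)]'(by omega) :=
        List.getElem_drop ..
      have heq : n + (r.length - 1 - l' - n) = r.length - 1 - l' := by omega
      have : (r.drop n)[r.length - 1 - l' - n] = (1 : Int) := by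
        rw [hdi, ← hN]; congr 1
      rw [← this]; exact List.getElem_mem hidx
    simp [hmem, hn]
  · have hnot : (1 : Int) ∉ r.drop n := by
      intro hmem
      obtain ⟨i, hi, hget⟩ := List.mem_iff_getElem.mp hmem
      have hi' : n + i < r.length := by have := hi; simp [List.length_drop] at this; omega
      have hget' : r[n + i]'hi' = 1 := by
        rw [← hget]; exact (List.getElem_drop ..).symm
      have hj : r.length - 1 - (n + i) < l' := by omega
      have : r.reverse[r.length - 1 - (n + i)]'(by simp; omega) = 1 := by
        rw [List.getElem_reverse]
        have heq : r.length - 1 - (r.length - 1 - (n + i)) = n + i := by omega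
        simp_rw [heq]; exact hget'
      exact hmin _ hj this
    simp [hnot, hn]

-- a [a, b) window filtered out of range(0, W)
lemma filter_pyRange_window (a b : Int) (ha : 0 ≤ a) : ∀ W : Nat,
    (PySem.List.pyRange 0 (W : Int) 1).filter (fun x => decide (a ≤ x) && decide (x < b))
      = PySem.List.pyRange a (min b (W : Int)) 1 := by
  intro W
  induction W with
  | zero =>
      rw [PySem.List.pyRange_one_eq_nil (by omega), PySem.List.pyRange_one_eq_nil (by omega)]
      rfl
  | succ W ih =>
      have hcast : ((W + 1 : Nat) : Int) = (W : Int) + 1 := by push_cast; ring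
      rw [hcast, PySem.List.pyRange_one_succ_right (by omega), List.filter_append, ih]
      by_cases hW : a ≤ (W : Int) ∧ (W : Int) < b
      · have h1 : min b ((W : Int) + 1) = (W : Int) + 1 := by omega
        have h2 : min b (W : Int) = (W : Int) := by omega
        rw [h1, h2, PySem.List.pyRange_one_succ_right (by omega)]
        simp [hW.1, hW.2]
      · have hfilt : (([(W : Int)]).filter (fun x => decide (a ≤ x) && decide (x < b))) = [] := by
          simp only [List.filter_cons, List.filter_nil]
          have : ¬(decide (a ≤ (W : Int)) && decide ((W : Int) < b)) = true := by
            simp; intro h1; omega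
          simp [this]
        rw [hfilt, List.append_nil]
        by_cases hb : b ≤ (W : Int)
        · have : min b ((W : Int) + 1) = min b (W : Int) := by omega
          rw [this]
        · have haW : (W : Int) < a := by omega
          rw [PySem.List.pyRange_one_eq_nil (by omega), PySem.List.pyRange_one_eq_nil (by omega)]

-- counting zeros by index over [a, b) is counting zeros in the slice r[a:b]
lemma countP_range_count (r : List Int) (a : Nat) : ∀ b : Nat, b ≤ r.length →
    (PySem.List.pyRange (a : Int) (b : Int) 1).countP (fun x => PySem.List.pyGetD r x 0 == 0)
      = ((r.drop a).take (b - a)).count 0 := by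
  intro b
  induction b with
  | zero =>
      intro _
      rw [PySem.List.pyRange_one_eq_nil (by omega)]
      simp
  | succ b ih =>
      intro hb
      by_cases hab : b < a
      · rw [PySem.List.pyRange_one_eq_nil (by omega)]
        have h0 : b + 1 - a = 0 := by omega
        rw [h0]
        simp
      · have hcast : ((b + 1 : Nat) : Int) = (b : Int) + 1 := by push_cast; ring
        rw [hcast, PySem.List.pyRange_one_succ_right (by omega),
          List.countP_append, ih (by omega)]
        have hblen : b < r.length := by omega
        have htake : (r.drop a).take (b + 1 - a)
            = (r.drop a).take (b - a) ++ [r[b]'hblen] := by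
          have h1 : b + 1 - a = (b - a) + 1 := by omega
          rw [h1, List.take_add_one]
          congr
          rw [List.getElem?_drop]
          have h2 : a + (b - a) = b := by omega
          rw [h2, List.getElem?_eq_getElem hblen]
          rfl
        rw [htake, List.count_append]
        congr 1
        have hp : PySem.List.pyGetD r ((b : Nat) : Int) 0 = r[b]'hblen := by
          rw [PySem.List.pyGetD_natCast, List.getD_eq_getElem r 0 hblen]
        simp [hp, List.count_cons]

-- the Int-level form, with Python's slice
lemma countP_pyRange_eq_count_slice (r : List Int) (a b : Int)
    (ha : 0 ≤ a) (hb0 : 0 ≤ b) (hb : b ≤ (r.length : Int)) :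
    (PySem.List.pyRange a b 1).countP (fun x => PySem.List.pyGetD r x 0 == 0)
      = PySem.List.count (PySem.List.slice r (some a) (some b)) 0 := by
  have ha' : a = ((a.toNat : Nat) : Int) := by omega
  have hb' : b = ((b.toNat : Nat) : Int) := by omega
  rw [PySem.List.count_eq, PySem.List.slice_toNat r ha hb0, ha', hb',
    countP_range_count r a.toNat b.toNat (by omega)]
  simp only [Int.toNat_natCast]

-- the per-row counts of A (scanning the row's own length) and of B agree
lemma row_count_eq (r : List Int) :
    (((PySem.List.pyRange 0 (r.length : Int) 1).countP
        (fun x => PySem.List.pyGetD r x 0 == 0 && isPool r x) : Nat) : Int)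
      = if r.contains 1 then
          ((PySem.List.count
              (PySem.List.slice r (some ((((PySem.List.index? r 1).getD 0 : Nat) : Int) + 1))
                (some ((r.length : Int) - 1 - (((PySem.List.index? r.reverse 1).getD 0 : Nat) : Int)))) 0 : Nat) : Int)
        else 0 := by
  by_cases hc : (1 : Int) ∈ r
  · have hrev : (1 : Int) ∈ r.reverse := by simpa using hc
    obtain ⟨l, hl⟩ := Option.isSome_iff_exists.mp ((PySem.List.index?_isSome_iff r 1).mpr hc)
    obtain ⟨l', hl'⟩ := Option.isSome_iff_exists.mp ((PySem.List.index?_isSome_iff r.reverse 1).mpr hrev)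
    obtain ⟨hl'len, -, -⟩ := PySem.List.getElem_of_index?_eq_some hl'
    have hcont : r.contains 1 = true := by simpa using hc
    rw [hl, hl', hcont, if_pos rfl]
    simp only [Option.getD_some]
    have hcongr : ∀ x ∈ PySem.List.pyRange 0 (r.length : Int) 1,
        (PySem.List.pyGetD r x 0 == 0 && isPool r x)
        = (PySem.List.pyGetD r x 0 == 0 &&
            (decide ((l : Int) + 1 ≤ x) && decide (x < (r.length : Int) - 1 - (l' : Int)))) := by
      intro x hx
      obtain ⟨hx0, hxW⟩ := PySem.List.mem_pyRange_one.mp hx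
      have h1 : PySem.List.slice r none (some x) = r.take x.toNat := PySem.List.slice_to r hx0
      have h2 : PySem.List.slice r (some (x + 1)) none = r.drop (x + 1).toNat :=
        PySem.List.slice_from r (by omega)
      have e1 : (r.take x.toNat).contains 1 = decide ((l : Int) + 1 ≤ x) := by
        rw [take_contains_one r l hl x.toNat]
        apply decide_eq_decide.mpr; omega
      have e2 : (r.drop (x + 1).toNat).contains 1
          = decide (x < (r.length : Int) - 1 - (l' : Int)) := by
        rw [drop_contains_one r l' hl' (x + 1).toNat]
        apply decide_eq_decide.mpr
        have hrl : l' < r.length := by simpa using hl'len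
        omega
      unfold isPool
      rw [h1, h2, e1, e2]
      cases decide ((l : Int) + 1 ≤ x) <;>
        cases decide (x < (r.length : Int) - 1 - (l' : Int)) <;> simp
    rw [List.countP_congr (fun x hx => by rw [hcongr x hx]), ← List.countP_filter,
      filter_pyRange_window ((l : Int) + 1) ((r.length : Int) - 1 - (l' : Int)) (by omega) r.length]
    have hrl : l' < r.length := by simpa using hl'len
    have hlen1 : 1 ≤ r.length := List.length_pos_iff.mpr (List.ne_nil_of_mem hc)
    have hmin : min ((r.length : Int) - 1 - (l' : Int)) ((r.length : Nat) : Int)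
        = (r.length : Int) - 1 - (l' : Int) := by omega
    rw [hmin]
    rw [countP_pyRange_eq_count_slice r ((l : Int) + 1)
      ((r.length : Int) - 1 - (l' : Int)) (by omega) (by omega) (by omega)]
  · have hc' : r.contains 1 = false := by simpa using hc
    rw [hc', if_neg (by simp)]
    have hz : (PySem.List.pyRange 0 (r.length : Int) 1).countP
        (fun x => PySem.List.pyGetD r x 0 == 0 && isPool r x) = 0 := by
      apply List.countP_eq_zero.mpr
      intro x hx
      suffices h : isPool r x = false by simp [h]
      unfold isPool
      cases hsl : (PySem.List.slice r none (some x)).contains 1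
      · simp
      · exfalso
        have : (1 : Int) ∈ PySem.List.slice r none (some x) := by simpa using hsl
        exact hc (PySem.List.mem_of_mem_slice r none (some x) this)
    rw [hz]
    rfl

-- indexing the rows of a list by range(len(..)) and mapping is mapping over the list
lemma map_getD_comp {a b : Type} (xs : List a) (d : a) (F : a -> b) :
    (PySem.List.pyRange 0 (xs.length : Int) 1).map (fun y => F (PySem.List.pyGetD xs y d))
      = xs.map F := by
  conv_rhs => rw [<- PySem.List.map_pyGetD_pyRange_zero' xs d]
  rw [List.map_map]
  rfl

-- ===== VERDICT (by name: the statement is the Claim_ definition above) =====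
theorem findPoolSize_spec : Claim_equal_findPoolSize := by
  intro matrix _ hPre
  unfold Spec_findPoolSize findPoolSize findPoolSize_alt
  simp only [PySem.List.foldl_if_add_one]
  rw [PySem.List.foldl_add]
  have hB := PySem.List.foldl_congr_mem (l := matrix) (init := (0 : Int))
      (f := fun (total : Int) (r : List Int) =>
        if r.contains 1 = true then
          total +
            ((PySem.List.count
              (PySem.List.slice r (some ((((PySem.List.index? r 1).getD 0 : Nat) : Int) + 1))
                (some ((r.length : Int) - 1 - (((PySem.List.index? r.reverse 1).getD 0 : Nat) : Int)))) 0 : Nat) : Int)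
        else total)
      (g := fun (total : Int) (r : List Int) =>
        total + (if r.contains 1 then
          ((PySem.List.count
              (PySem.List.slice r (some ((((PySem.List.index? r 1).getD 0 : Nat) : Int) + 1))
                (some ((r.length : Int) - 1 - (((PySem.List.index? r.reverse 1).getD 0 : Nat) : Int)))) 0 : Nat) : Int)
          else 0))
      (fun acc r _ => by by_cases h : (1 : Int) ∈ r <;> simp [h])
  rw [hB, PySem.List.foldl_add]
  rw [PySem.List.pyRange_neg_one_eq_reverse]
  have h01 : (-1 : Int) + 1 = 0 := by norm_num
  have h02 : (matrix.length : Int) - 1 + 1 = (matrix.length : Int) := by ring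
  rw [h01, h02, List.map_reverse, List.sum_reverse]
  rw [map_getD_comp matrix ([] : List Int) (fun r =>
        ((List.countP (fun x => PySem.List.pyGetD r x 0 == 0 && isPool r x)
            (PySem.List.pyRange 0 ((PySem.List.pyGetD matrix 0 ([] : List Int)).length : Int) 1) : Nat) : Int))]
  congr 1
  refine congrArg List.sum ?_
  apply List.map_congr_left
  intro r hr
  have hlen : r.length = (PySem.List.pyGetD matrix 0 ([] : List Int)).length :=
    eq_of_beq ((List.all_eq_true.mp hPre.2) r hr)
  rw [← hlen]
  exact row_count_eq r
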